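-- pv_equiv track=rewrite | github.com/pypi-data/pypi-mirror-330 | packages/rs1101/rs1101-0.3.8-py3-none-any.whl/rs1101/random_string.py | rs2int
-- ===== SOURCE A (Python) =====
-- candidate = ""
--
-- def rs2int(rs, candidate=candidate):
--     l = len(candidate)
--     ret = 0
--     weight = 1
--     for x in rs[::-1]:
--         ret += candidate.index(x) * weight
--         weight *= l
--     return ret
-- ===== SOURCE B (Python) =====
-- def rs2int(rs, candidate=""):
--     # Horner's method: single forward pass, no reversal, no weight variable.
--     l = len(candidate)
--     ret = 0
--     for x in rs:
--         ret = ret * l + candidate.index(x)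
--     return ret
-- ===== Notes on version B (the rewrite author's own statement) =====
-- stated objective: simpler
-- what changed: Replaces the reversed-iteration with an explicit weight accumulator by Horner's method: one forward pass keeping a single accumulator ret = ret*len(candidate) + candidate.index(x).
import Mathlib
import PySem

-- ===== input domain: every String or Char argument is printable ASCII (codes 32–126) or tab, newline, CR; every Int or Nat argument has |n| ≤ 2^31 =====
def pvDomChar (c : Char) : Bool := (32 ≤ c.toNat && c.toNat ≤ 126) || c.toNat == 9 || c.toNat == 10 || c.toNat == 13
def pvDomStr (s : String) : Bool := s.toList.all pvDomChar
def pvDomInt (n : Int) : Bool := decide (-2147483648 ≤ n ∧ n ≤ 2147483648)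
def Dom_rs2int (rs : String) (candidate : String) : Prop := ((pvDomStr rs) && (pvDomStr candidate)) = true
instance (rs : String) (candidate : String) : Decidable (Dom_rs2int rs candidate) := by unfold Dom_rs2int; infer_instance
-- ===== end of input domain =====

-- B replaces A's reversed pass with a separate weight accumulator by a single
-- forward Horner pass with one accumulator (objective: simpler).

-- ===== PORT A =====
-- candidate.index(x): Python raises ValueError when x ∉ candidate; index? returns
-- none there.  Such inputs are excluded by Pre_rs2int; the .getD 0 total completion
-- is never reached inside Pre_.
def pyIndex (candidate : String) (x : Char) : Int :=
  ((PySem.List.index? candidate.toList x).getD 0 : Nat)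

-- literal port of A: l = len(candidate); ret = 0; weight = 1;
-- for x in rs[::-1]: ret += candidate.index(x) * weight; weight *= l
def rs2int (rs : String) (candidate : String) : Int :=
  let l : Int := PySem.Str.len candidate
  let rev : List Char := ((PySem.Chars.slice? rs.toList none none (-1)).getD [])
  (rev.foldl (fun (st : Int × Int) x => (st.1 + pyIndex candidate x * st.2, st.2 * l)) (0, 1)).1

-- ===== PORT B =====
-- literal port of B: l = len(candidate); ret = 0;
-- for x in rs: ret = ret * l + candidate.index(x)
def rs2int_alt (rs : String) (candidate : String) : Int :=
  let l : Int := PySem.Str.len candidate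
  rs.toList.foldl (fun ret x => ret * l + pyIndex candidate x) 0

-- ===== PRECONDITION & SPEC =====
-- Pre_ excludes exactly the inputs where Python's candidate.index(x) raises
-- ValueError (a character of rs not occurring in candidate); both A and B raise there.
def Pre_rs2int (rs : String) (candidate : String) : Prop :=
  (rs.toList.all (fun c => candidate.toList.contains c)) = true
instance (rs : String) (candidate : String) : Decidable (Pre_rs2int rs candidate) := by
  unfold Pre_rs2int; infer_instance
def pvWitness_rs2int : String × String := ("cab", "abc")

def Spec_rs2int (rs : String) (candidate : String) (out : Int) : Prop := out = rs2int_alt rs candidate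
instance (rs : String) (candidate : String) (out : Int) : Decidable (Spec_rs2int rs candidate out) := by
  unfold Spec_rs2int; infer_instance

-- ===== CLAIM (what is proved, stated in full; the proofs are below) =====
def Claim_equal_rs2int : Prop := ∀ (rs : String) (candidate : String), Dom_rs2int rs candidate → Pre_rs2int rs candidate → Spec_rs2int rs candidate (rs2int rs candidate)

-- ===== LEMMAS AND PROOFS =====

-- A's pair fold, characterised: first component is r + w · (Horner foldr of the digits).
theorem foldA_fst (l : Int) (f : Char → Int) (xs : List Char) :
    ∀ r w : Int,
      (xs.foldl (fun (st : Int × Int) x => (st.1 + f x * st.2, st.2 * l)) (r, w)).1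
        = r + w * xs.foldr (fun x a => f x + l * a) 0 := by
  induction xs with
  | nil => intro r w; simp
  | cons x xs ih =>
    intro r w
    simp only [List.foldl_cons, List.foldr_cons, ih]
    ring

theorem rs2int_eq_alt (rs candidate : String) :
    rs2int rs candidate = rs2int_alt rs candidate := by
  unfold rs2int rs2int_alt
  rw [PySem.Chars.slice?_eq_listSlice?, PySem.List.slice?_none_none_neg_one]
  simp only [Option.getD_some]
  rw [foldA_fst]
  rw [List.foldr_reverse]
  simp only [zero_add, one_mul]
  congr 1
  funext a x
  ring

-- ===== VERDICT (by name: the statement is the Claim_ definition above) =====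
theorem rs2int_spec : Claim_equal_rs2int := by
  intro rs candidate _ _
  exact rs2int_eq_alt rs candidate
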